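-- pv_equiv track=rewrite | github.com/auberr/til | CodingTest/programmers/2nd_week/04_divide.py | solution
-- ===== SOURCE A (Python) =====
-- def solution(n):
--     answer = 0
--     minimum = n
--     for i in range(1, n):
--         if n % i == 1:
--             if i < minimum:
--                 minimum = i
--     answer = minimum
--     return answer
-- ===== SOURCE B (Python) =====
-- def solution(n):
--     # smallest i in [1, n) with n % i == 1 (default n) = least divisor >= 2 of n-1,
--     # found by trial division up to sqrt(n-1).
--     if n <= 2:
--         return n
--     m = n - 1
--     d = 2
--     while d * d <= m:
--         if m % d == 0:
--             return d
--         d += 1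
--     return m
-- ===== Notes on version B (the rewrite author's own statement) =====
-- stated objective: faster
-- what changed: Replaced the linear scan over range(1,n) keeping a running minimum by trial division up to the square root: the answer is the least nontrivial divisor of n-1, with n returned unchanged when no index of the scan matches.
import Mathlib
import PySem

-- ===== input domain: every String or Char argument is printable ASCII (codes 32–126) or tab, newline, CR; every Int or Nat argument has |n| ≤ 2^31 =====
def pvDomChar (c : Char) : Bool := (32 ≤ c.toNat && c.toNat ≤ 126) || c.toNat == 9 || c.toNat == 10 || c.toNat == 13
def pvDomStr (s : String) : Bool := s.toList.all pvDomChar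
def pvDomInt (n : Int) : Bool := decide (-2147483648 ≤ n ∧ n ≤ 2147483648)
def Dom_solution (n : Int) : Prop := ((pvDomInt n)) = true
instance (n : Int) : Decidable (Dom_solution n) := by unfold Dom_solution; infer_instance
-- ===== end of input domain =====

-- B replaces A's linear scan over range(1, n) by trial division up to the square root:
-- the answer is the least nontrivial divisor of n-1 (n itself when no scan index matches); measured faster.

-- ===== PORT A =====
def solution (n : Int) : Int :=
  let answer : Int := 0
  let minimum : Int := n
  let minimum :=
    (PySem.List.pyRange 1 n 1).foldl
      (fun minimum i =>
        if PySem.Int.mod n i == 1 then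
          if i < minimum then i else minimum
        else minimum) minimum
  let answer := minimum
  answer

-- ===== PORT B =====
-- the `while d * d <= m` loop of Source B; d starts at 2 and only increases, kept as a Nat
def trialDiv (m : Int) (d : Nat) : Int :=
  if h : (d : Int) * d ≤ m then
    if PySem.Int.mod m d == 0 then (d : Int)
    else trialDiv m (d + 1)
  else m
termination_by m.toNat + 1 - d
decreasing_by
  have hd : (d : Int) ≤ (d : Int) * d := by
    rcases Nat.eq_zero_or_pos d with h0 | h0
    · simp [h0]
    · have : (1 : Int) ≤ (d : Int) := by exact_mod_cast h0
      nlinarith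
  have : (d : Int) ≤ m := le_trans hd h
  omega

def solution_alt (n : Int) : Int :=
  if n ≤ 2 then n
  else trialDiv (n - 1) 2

-- ===== PRECONDITION & SPEC =====
def Spec_solution (n : Int) (out : Int) : Prop := out = solution_alt n
instance (n : Int) (out : Int) : Decidable (Spec_solution n out) := by unfold Spec_solution; infer_instance

-- ===== CLAIM (what is proved, stated in full; the proofs are below) =====
def Claim_equal_solution : Prop := ∀ (n : Int), Dom_solution n → Spec_solution n (solution n)

-- ===== LEMMAS AND PROOFS =====

-- A's loop step
def stepA (n : Int) : Int → Int → Int :=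
  fun minimum i =>
    if PySem.Int.mod n i == 1 then
      if i < minimum then i else minimum
    else minimum

lemma foldl_stepA_of_no_hit (n : Int) (l : List Int) (acc : Int)
    (h : ∀ i ∈ l, PySem.Int.mod n i ≠ 1) :
    l.foldl (stepA n) acc = acc := by
  induction l generalizing acc with
  | nil => rfl
  | cons x l ih =>
    have hx := h x (List.mem_cons_self ..)
    simp only [List.foldl_cons, stepA]
    rw [if_neg (by simpa using hx)]
    exact ih acc (fun i hi => h i (List.mem_cons_of_mem _ hi))

lemma foldl_stepA_of_le (n : Int) (l : List Int) (acc : Int)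
    (h : ∀ i ∈ l, acc ≤ i) :
    l.foldl (stepA n) acc = acc := by
  induction l with
  | nil => rfl
  | cons x l ih =>
    have hx := h x (List.mem_cons_self ..)
    simp only [List.foldl_cons, stepA]
    have hnx : ¬ x < acc := not_lt.mpr hx
    rw [if_neg hnx, ite_self]
    exact ih (fun i hi => h i (List.mem_cons_of_mem _ hi))

-- n % i = 1 ↔ i ∣ n - 1, for divisor i ≥ 2
lemma mod_eq_one_iff (n i : Int) (hi : 2 ≤ i) :
    PySem.Int.mod n i = 1 ↔ i ∣ (n - 1) := by
  rw [PySem.Int.mod_eq_emod_of_pos (by omega : (0:Int) < i)]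
  constructor
  · intro h
    have : (n - 1) % i = 0 := by
      rw [Int.sub_emod, h]
      simp
    exact Int.dvd_of_emod_eq_zero this
  · intro h
    obtain ⟨k, hk⟩ := h
    have hn : n = i * k + 1 := by omega
    rw [hn, show i * k + 1 = 1 + i * k from by ring, Int.add_mul_emod_self_left]
    exact Int.emod_eq_of_lt (by omega) (by omega)

-- B's loop computes Nat.minFac
theorem trialDiv_eq_minFac (m : Nat) (hm : 2 ≤ m) (d : Nat) (hd : 2 ≤ d)
    (hinv : ∀ k, 2 ≤ k → k < d → ¬ k ∣ m) :
    trialDiv (m : Int) d = (m.minFac : Int) := by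
  have hp : m.minFac.Prime := Nat.minFac_prime (by omega)
  have hdvd : m.minFac ∣ m := Nat.minFac_dvd m
  have hge : d ≤ m.minFac := by
    by_contra h
    exact hinv m.minFac hp.two_le (by omega) hdvd
  rw [trialDiv]
  split
  · rename_i hle
    split
    · rename_i hz
      have hz' : (d : Int) ∣ (m : Int) := by
        rw [← PySem.Int.mod_eq_zero_iff_dvd]
        simpa using hz
      have hdm : d ∣ m := by exact_mod_cast hz'
      have : m.minFac ≤ d := Nat.minFac_le_of_dvd hd hdm
      have : m.minFac = d := by omega
      simp [this]
    · rename_i hz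
      have hnd : ¬ d ∣ m := by
        intro hdm
        apply hz
        have : (d : Int) ∣ (m : Int) := by exact_mod_cast hdm
        rw [← PySem.Int.mod_eq_zero_iff_dvd] at this
        simpa using this
      exact trialDiv_eq_minFac m hm (d + 1) (by omega)
        (fun k hk2 hkd => by
          rcases Nat.lt_succ_iff_lt_or_eq.mp hkd with h | h
          · exact hinv k hk2 h
          · subst h; exact hnd)
  · rename_i hle
    -- no divisor found up to √m : m is its own least factor
    have hc : m / m.minFac ∣ m := Nat.div_dvd_of_dvd hdvd
    have hmul : m.minFac * (m / m.minFac) = m := Nat.mul_div_cancel' hdvd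
    have hcpos : 1 ≤ m / m.minFac :=
      Nat.div_pos (Nat.minFac_le (by omega)) hp.pos
    rcases Nat.lt_or_ge (m / m.minFac) 2 with h1 | h1
    · have : m / m.minFac = 1 := by omega
      rw [this, Nat.mul_one] at hmul
      simp [hmul]
    · exfalso
      have hcge : d ≤ m / m.minFac := by
        by_contra h
        exact hinv (m / m.minFac) h1 (by omega) hc
      have : (d : Int) * d ≤ (m : Int) := by
        have : d * d ≤ m := by calc
          d * d ≤ m.minFac * (m / m.minFac) := Nat.mul_le_mul hge hcge
          _ = m := hmul
        exact_mod_cast this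
      exact hle this
termination_by m + 1 - d
decreasing_by
  have : (d : Int) ≤ (m : Int) := by
    rename_i hle _
    have hd' : (d : Int) ≤ (d : Int) * d := by
      have : (1 : Int) ≤ (d : Int) := by exact_mod_cast (by omega : 1 ≤ d)
      nlinarith
    exact le_trans hd' hle
  have : d ≤ m := by exact_mod_cast this
  omega

-- A computes the least factor of n-1 when n ≥ 3
lemma solution_eq_minFac (n : Int) (hn : 3 ≤ n) :
    solution n = ((n - 1).toNat.minFac : Int) := by
  set m : Nat := (n - 1).toNat with hm
  have hmn : ((m : Int)) = n - 1 := Int.toNat_of_nonneg (by omega)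
  have hm2 : 2 ≤ m := by omega
  have hp : m.minFac.Prime := Nat.minFac_prime (by omega)
  set d : Nat := m.minFac with hdd
  have hd2 : 2 ≤ d := hp.two_le
  have hdle : d ≤ m := Nat.minFac_le (by omega)
  have hdvd : (d : Int) ∣ (n - 1) := by
    rw [← hmn]
    exact_mod_cast Nat.minFac_dvd m
  have hsplit : PySem.List.pyRange 1 n 1 =
      PySem.List.pyRange 1 (d : Int) 1 ++ PySem.List.pyRange (d : Int) n 1 :=
    PySem.List.pyRange_one_append _ _ _ (by exact_mod_cast (by omega : 1 ≤ d)) (by omega)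
  show (PySem.List.pyRange 1 n 1).foldl (stepA n) n = (d : Int)
  rw [hsplit, List.foldl_append]
  rw [foldl_stepA_of_no_hit n _ n (fun i hi => by
    rw [PySem.List.mem_pyRange_one] at hi
    intro hmod
    rcases Int.lt_or_le i 2 with h2 | h2
    · have hi1 : i = 1 := by omega
      rw [hi1, PySem.Int.mod_eq_emod_of_pos (by omega : (0:Int) < 1)] at hmod
      simp at hmod
    · have hidvd : i ∣ (n - 1) := (mod_eq_one_iff n i h2).mp hmod
      have : i.toNat ∣ m := by
        have : ((i.toNat : Int)) ∣ ((m : Int)) := by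
          rw [hmn, Int.toNat_of_nonneg (by omega : (0:Int) ≤ i)]
          exact hidvd
        exact_mod_cast this
      have := Nat.minFac_le_of_dvd (by omega) this
      omega)]
  rw [PySem.List.pyRange_one_cons (by omega)]
  simp only [List.foldl_cons, stepA]
  rw [if_pos (by
    simp only [beq_iff_eq]
    exact (mod_eq_one_iff n (d : Int) (by exact_mod_cast hd2)).mpr hdvd)]
  rw [if_pos (by omega)]
  exact foldl_stepA_of_le n _ _ (fun i hi => by
    rw [PySem.List.mem_pyRange_one] at hi
    omega)

lemma solution_alt_eq_minFac (n : Int) (hn : 3 ≤ n) :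
    solution_alt n = ((n - 1).toNat.minFac : Int) := by
  have hmn : (((n - 1).toNat : Int)) = n - 1 := Int.toNat_of_nonneg (by omega)
  rw [solution_alt, if_neg (by omega), ← hmn]
  exact trialDiv_eq_minFac _ (by omega) 2 le_rfl (fun k hk2 hkd _ => by omega)

-- ===== VERDICT (by name: the statement is the Claim_ definition above) =====
theorem solution_spec : Claim_equal_solution := by
  intro n _
  unfold Spec_solution
  rcases Int.lt_or_le n 3 with h3 | h3
  · rcases Int.lt_or_le n 2 with h2 | h2
    · show (PySem.List.pyRange 1 n 1).foldl (stepA n) n = solution_alt n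
      rw [PySem.List.pyRange_one_eq_nil (by omega)]
      simp [solution_alt, if_pos (by omega : n ≤ 2)]
    · have : n = 2 := by omega
      subst this
      decide
  · rw [solution_eq_minFac n h3, solution_alt_eq_minFac n h3]
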